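-- pv_equiv track=rewrite | github.com/fivethreeo/FreeCAD-Steel_Frame | funcPanelizer/panelize.py | choosePiece
-- ===== SOURCE A (Python) =====
-- def calculateWaste(pieceLength, pieceWidth, coverDistance):
--     # Function to calculate the waste in terms of area given the
--     # length of a piece in the direction analyzed, the perpendicular width
--     # and the distance to cover, it Returns the waste in square units
--
--     if pieceLength > coverDistance:
--         return (pieceLength - coverDistance) * pieceWidth
--     elif pieceLength == coverDistance:
--         return 0
--     else:
--         if coverDistance % pieceLength == 0:
--             return 0
--         else:
--             return (pieceLength - (coverDistance % pieceLength)) * pieceWidth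
--
-- def choosePiece(pieces, horizontalDistance, verticalDistance):
--     # Function to find the minimum waste given the horizontal and vertical
--     # distance to cover and several pieces.
--     # it returns a tuple with the piece with minimum waste and the waste (Area)
--
--     # Revise in both directions
--     verticalWaste = [
--         calculateWaste(x[1], x[0], verticalDistance) for x in pieces
--     ]
--     horizontalWaste = [
--         calculateWaste(x[0], x[1], horizontalDistance) for x in pieces
--     ]
--     summedWaste = [sum(x) for x in zip(verticalWaste, horizontalWaste)]
--     # Aggregate waste
--     minIndex = summedWaste.index(min(summedWaste))
--     return (minIndex, summedWaste[minIndex])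
-- ===== SOURCE B (Python) =====
-- def calculateWaste(pieceLength, pieceWidth, coverDistance):
--     if pieceLength > coverDistance:
--         return (pieceLength - coverDistance) * pieceWidth
--     elif pieceLength == coverDistance:
--         return 0
--     else:
--         if coverDistance % pieceLength == 0:
--             return 0
--         else:
--             return (pieceLength - (coverDistance % pieceLength)) * pieceWidth
--
-- def choosePiece(pieces, horizontalDistance, verticalDistance):
--     # Rank every piece by its (combined waste, index) tuple and sort; the
--     # lexicographic tuple order makes the head the piece with minimum waste,
--     # ties resolved to the smallest index — exactly min()/.index() semantics.
--     ranked = sorted(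
--         (calculateWaste(p[1], p[0], verticalDistance)
--          + calculateWaste(p[0], p[1], horizontalDistance), i)
--         for i, p in enumerate(pieces))
--     waste, index = ranked[0]
--     return (index, waste)
-- ===== Notes on version B (the rewrite author's own statement) =====
-- stated objective: alternative
-- what changed: Instead of three parallel waste lists reduced by min()/.index()/indexing, B ranks every piece by the tuple (combined waste, index), sorts the tuples (Python's lexicographic tuple order, smallest index first on equal waste) and returns the head, which is exactly the first minimum.
import Mathlib
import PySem

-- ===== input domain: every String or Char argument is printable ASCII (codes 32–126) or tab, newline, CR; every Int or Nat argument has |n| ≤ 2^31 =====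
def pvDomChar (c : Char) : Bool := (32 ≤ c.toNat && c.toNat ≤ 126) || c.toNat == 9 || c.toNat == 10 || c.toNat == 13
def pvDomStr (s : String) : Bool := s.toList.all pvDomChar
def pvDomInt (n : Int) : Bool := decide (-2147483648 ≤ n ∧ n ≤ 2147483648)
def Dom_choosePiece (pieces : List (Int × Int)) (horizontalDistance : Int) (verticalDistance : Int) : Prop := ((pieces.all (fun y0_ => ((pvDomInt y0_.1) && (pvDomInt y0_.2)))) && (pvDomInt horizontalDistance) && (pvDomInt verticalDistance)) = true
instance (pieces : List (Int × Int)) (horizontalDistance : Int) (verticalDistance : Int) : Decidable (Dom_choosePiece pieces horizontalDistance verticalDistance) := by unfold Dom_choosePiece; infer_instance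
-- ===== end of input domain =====

-- B sorts the (combined waste, index) pairs lexicographically and takes the head instead of A's three temporary lists plus min()/.index() scans (objective: alternative).

-- ===== PORT A =====
-- shared module helper (used by both Python versions unchanged)
def calculateWaste (pieceLength pieceWidth coverDistance : Int) : Int :=
  if pieceLength > coverDistance then (pieceLength - coverDistance) * pieceWidth
  else if pieceLength = coverDistance then 0
  else if PySem.Int.mod coverDistance pieceLength = 0 then 0
  else (pieceLength - PySem.Int.mod coverDistance pieceLength) * pieceWidth
  -- (coverDistance % 0 is a ZeroDivisionError in Python; those inputs are outside Pre_)

def choosePiece (pieces : List (Int × Int)) (horizontalDistance : Int) (verticalDistance : Int) : Int × Int :=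
  let verticalWaste := pieces.map (fun x => calculateWaste x.2 x.1 verticalDistance)
  let horizontalWaste := pieces.map (fun x => calculateWaste x.1 x.2 horizontalDistance)
  let summedWaste := (verticalWaste.zip horizontalWaste).map (fun x => x.1 + x.2)
  match PySem.List.min? summedWaste (fun x => x) with
  | none => (0, 0)  -- min([]) raises ValueError; excluded by Pre_
  | some m =>
    match PySem.List.index? summedWaste m with
    | none => (0, 0)  -- unreachable: m is a member of summedWaste
    | some minIndex => ((minIndex : Int), (PySem.List.pyGet? summedWaste (minIndex : Int)).getD 0)

-- ===== PORT B =====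
-- 'sorted(... for i, p in enumerate(pieces))' over tuples: sorted2 is Python's lexicographic tuple sort
def choosePiece_alt (pieces : List (Int × Int)) (horizontalDistance : Int) (verticalDistance : Int) : Int × Int :=
  let ranked := PySem.List.sorted2
      ((PySem.List.enumerate pieces 0).map
        (fun ip => (calculateWaste ip.2.2 ip.2.1 verticalDistance
                      + calculateWaste ip.2.1 ip.2.2 horizontalDistance, ip.1)))
      Prod.fst Prod.snd
  match ranked with
  | [] => (0, 0)  -- ranked[0] is an IndexError on empty pieces; excluded by Pre_
  | (w, i) :: _ => (i, w)

-- ===== PRECONDITION & SPEC =====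
-- Pre_ excludes exactly where A raises: the empty list (min([]) is ValueError) and any piece whose
-- analyzed length is 0 while the distance to cover is positive (coverDistance % 0 is ZeroDivisionError).
def Pre_choosePiece (pieces : List (Int × Int)) (horizontalDistance : Int) (verticalDistance : Int) : Prop :=
  pieces ≠ [] ∧ ∀ p ∈ pieces, ¬(p.2 = 0 ∧ 0 < verticalDistance) ∧ ¬(p.1 = 0 ∧ 0 < horizontalDistance)
instance (pieces : List (Int × Int)) (horizontalDistance : Int) (verticalDistance : Int) : Decidable (Pre_choosePiece pieces horizontalDistance verticalDistance) := by unfold Pre_choosePiece; infer_instance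
def pvWitness_choosePiece : (List (Int × Int)) × Int × Int := ([(2, 3), (4, 5)], 7, 9)

def Spec_choosePiece (pieces : List (Int × Int)) (horizontalDistance : Int) (verticalDistance : Int) (out : Int × Int) : Prop := out = choosePiece_alt pieces horizontalDistance verticalDistance
instance (pieces : List (Int × Int)) (horizontalDistance : Int) (verticalDistance : Int) (out : Int × Int) : Decidable (Spec_choosePiece pieces horizontalDistance verticalDistance out) := by unfold Spec_choosePiece; infer_instance

-- ===== CLAIM (what is proved, stated in full; the proofs are below) =====
def Claim_equal_choosePiece : Prop := ∀ (pieces : List (Int × Int)) (horizontalDistance : Int) (verticalDistance : Int), Dom_choosePiece pieces horizontalDistance verticalDistance → Pre_choosePiece pieces horizontalDistance verticalDistance → Spec_choosePiece pieces horizontalDistance verticalDistance (choosePiece pieces horizontalDistance verticalDistance)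

-- ===== LEMMAS AND PROOFS =====

-- the combined waste of one piece
def pvW (hD vD : Int) (p : Int × Int) : Int :=
  calculateWaste p.2 p.1 vD + calculateWaste p.1 p.2 hD

-- proof device: the first-minimum scan both programs' results are reduced to
def choosePieceLoop (horizontalDistance verticalDistance : Int) :
    List (Int × Int) → Int → Int → Int → Int × Int
  | [], bestIndex, bestWaste, _ => (bestIndex, bestWaste)
  | p :: rest, bestIndex, bestWaste, i =>
      let w := calculateWaste p.2 p.1 verticalDistance + calculateWaste p.1 p.2 horizontalDistance
      if w < bestWaste then choosePieceLoop horizontalDistance verticalDistance rest i w (i + 1)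
      else choosePieceLoop horizontalDistance verticalDistance rest bestIndex bestWaste (i + 1)

lemma pvFoldlMin_le (l : List Int) (x : Int) : l.foldl min x ≤ x := by
  induction l generalizing x with
  | nil => simp
  | cons a l ih => exact le_trans (ih (min x a)) (min_le_left _ _)

lemma pvFoldlMin_mem (l : List Int) (x : Int) : l.foldl min x = x ∨ l.foldl min x ∈ l := by
  induction l generalizing x with
  | nil => simp
  | cons a l ih =>
    rcases ih (min x a) with h | h
    · simp only [List.foldl_cons, h]
      rcases le_total x a with hxa | hxa
      · left; exact min_eq_left hxa
      · right; simp [min_eq_right hxa]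
    · right; simp [List.foldl_cons, h]

-- closed form of the first-minimum scan
lemma choosePieceLoop_spec (hD vD : Int) (rest : List (Int × Int)) :
    ∀ (bi bw i : Int),
      choosePieceLoop hD vD rest bi bw i =
        (if _h : (rest.map (pvW hD vD)).foldl min bw = bw then (bi, bw)
         else (i + ((PySem.List.index? (rest.map (pvW hD vD))
                      ((rest.map (pvW hD vD)).foldl min bw)).getD 0 : Nat),
               (rest.map (pvW hD vD)).foldl min bw)) := by
  induction rest with
  | nil => intro bi bw i; simp [choosePieceLoop]
  | cons p rest ih =>
    intro bi bw i
    have hx : pvW hD vD p = calculateWaste p.2 p.1 vD + calculateWaste p.1 p.2 hD := rfl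
    have hmap : (p :: rest).map (pvW hD vD) = pvW hD vD p :: rest.map (pvW hD vD) := rfl
    by_cases hlt : pvW hD vD p < bw
    · rw [show choosePieceLoop hD vD (p :: rest) bi bw i
            = choosePieceLoop hD vD rest i (pvW hD vD p) (i + 1) by
          simp [choosePieceLoop, ← hx, hlt]]
      rw [ih]
      have hfold : ((p :: rest).map (pvW hD vD)).foldl min bw
          = (rest.map (pvW hD vD)).foldl min (pvW hD vD p) := by
        simp [hmap, List.foldl_cons, min_eq_right (le_of_lt hlt)]
      rw [hfold]
      set m := (rest.map (pvW hD vD)).foldl min (pvW hD vD p) with hm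
      have hmle : m ≤ pvW hD vD p := pvFoldlMin_le _ _
      rw [dif_neg (show ¬ m = bw by omega)]
      by_cases heq : m = pvW hD vD p
      · rw [dif_pos heq, hmap, heq, PySem.List.index?_cons_self]
        simp
      · rw [dif_neg heq]
        have hmem : m ∈ rest.map (pvW hD vD) := by
          rcases pvFoldlMin_mem (rest.map (pvW hD vD)) (pvW hD vD p) with h | h
          · exact absurd h heq
          · exact h
        obtain ⟨j, hj⟩ := Option.isSome_iff_exists.mp
          ((PySem.List.index?_isSome_iff (rest.map (pvW hD vD)) m).2 hmem)
        have hmlt : m < pvW hD vD p := lt_of_le_of_ne hmle heq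
        rw [hmap, PySem.List.index?_cons_of_ne (rest.map (pvW hD vD)) (by omega : pvW hD vD p ≠ m), hj]
        simp only [Option.map_some, Option.getD_some, Prod.mk.injEq]
        exact ⟨by push_cast; ring, trivial⟩
    · rw [show choosePieceLoop hD vD (p :: rest) bi bw i
            = choosePieceLoop hD vD rest bi bw (i + 1) by
          simp [choosePieceLoop, ← hx, hlt]]
      rw [ih]
      have hfold : ((p :: rest).map (pvW hD vD)).foldl min bw
          = (rest.map (pvW hD vD)).foldl min bw := by
        simp [hmap, List.foldl_cons, min_eq_left (by omega : bw ≤ pvW hD vD p)]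
      rw [hfold]
      set m := (rest.map (pvW hD vD)).foldl min bw with hm
      by_cases heq : m = bw
      · rw [dif_pos heq, dif_pos heq]
      · rw [dif_neg heq, dif_neg heq]
        have hmle : m ≤ bw := pvFoldlMin_le _ _
        have hmem : m ∈ rest.map (pvW hD vD) := by
          rcases pvFoldlMin_mem (rest.map (pvW hD vD)) bw with h | h
          · exact absurd h heq
          · exact h
        obtain ⟨j, hj⟩ := Option.isSome_iff_exists.mp
          ((PySem.List.index?_isSome_iff (rest.map (pvW hD vD)) m).2 hmem)
        have hxne : pvW hD vD p ≠ m := by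
          have hnle : ¬ pvW hD vD p < bw := hlt
          omega
        rw [hmap, PySem.List.index?_cons_of_ne (rest.map (pvW hD vD)) hxne, hj]
        simp only [Option.map_some, Option.getD_some, Prod.mk.injEq]
        exact ⟨by push_cast; ring, trivial⟩

-- A's summedWaste list is the map of the combined waste over the pieces
lemma pvSummed_eq (pieces : List (Int × Int)) (hD vD : Int) :
    ((pieces.map (fun x => calculateWaste x.2 x.1 vD)).zip
      (pieces.map (fun x => calculateWaste x.1 x.2 hD))).map (fun x => x.1 + x.2)
    = pieces.map (pvW hD vD) := by
  rw [List.zip_map']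
  simp [List.map_map, Function.comp_def, pvW]

-- A reduces to the first-minimum scan
lemma pvA_eq_loop (p : Int × Int) (rest : List (Int × Int)) (hD vD : Int) :
    choosePiece (p :: rest) hD vD = choosePieceLoop hD vD rest 0 (pvW hD vD p) 1 := by
  unfold choosePiece
  simp only [pvSummed_eq (p :: rest) hD vD]
  rw [choosePieceLoop_spec]
  have hmap : (p :: rest).map (pvW hD vD) = pvW hD vD p :: rest.map (pvW hD vD) := rfl
  rw [hmap, PySem.List.min?_id_cons]
  dsimp only
  set x := pvW hD vD p with hxdef
  set m := (rest.map (pvW hD vD)).foldl min x with hm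
  have hmle : m ≤ x := pvFoldlMin_le _ _
  by_cases heq : m = x
  · have hidx : PySem.List.index? (x :: rest.map (pvW hD vD)) m = some 0 := by
      rw [heq]; exact PySem.List.index?_cons_self _ _
    rw [dif_pos heq, hidx]
    simp [PySem.List.pyGet?, PySem.List.pyIdx?]
  · have hmem : m ∈ rest.map (pvW hD vD) := by
      rcases pvFoldlMin_mem (rest.map (pvW hD vD)) x with h | h
      · exact absurd h heq
      · exact h
    obtain ⟨j, hj⟩ := Option.isSome_iff_exists.mp
      ((PySem.List.index?_isSome_iff (rest.map (pvW hD vD)) m).2 hmem)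
    have hidx : PySem.List.index? (x :: rest.map (pvW hD vD)) m = some (j + 1) := by
      rw [PySem.List.index?_cons_of_ne (rest.map (pvW hD vD)) (fun h => heq h.symm), hj]; rfl
    rw [dif_neg heq, hidx, hj]
    obtain ⟨hk, hkm, -⟩ := PySem.List.getElem_of_index?_eq_some hidx
    have hget : PySem.List.pyGet? (x :: rest.map (pvW hD vD)) (((j + 1 : Nat) : Int)) = some m := by
      rw [PySem.List.pyGet?_natCast]
      simp [List.getElem?_eq_getElem hk, hkm]
    simp only [hget, Option.getD_some, Prod.mk.injEq]
    exact ⟨by push_cast; ring, trivial⟩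

-- B-side: head of an insertion
lemma pvHead?_insertBy {α : Type} (before : α → α → Bool) (x : α) (ys : List α) :
    (PySem.List.insertBy before x ys).head?
      = some (match ys with | [] => x | y :: _ => if before x y then x else y) := by
  cases ys with
  | nil => rfl
  | cons y ys =>
    by_cases h : before x y
    · simp [PySem.List.insertBy, h]
    · simp [PySem.List.insertBy, h]

-- B-side: head of the insertion-sort fold is a running minimum under 'before'
lemma pvHead?_foldl_insertBy {α : Type} (before : α → α → Bool) :
    ∀ (xs : List α) (acc : List α) (a : α), acc.head? = some a →
      (xs.foldl (fun ac x => PySem.List.insertBy before x ac) acc).head?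
        = some (xs.foldl (fun m x => if before x m then x else m) a) := by
  intro xs
  induction xs with
  | nil => intro acc a h; simpa using h
  | cons x xs ih =>
    intro acc a h
    cases acc with
    | nil => simp at h
    | cons b t =>
      simp only [List.head?_cons, Option.some.injEq] at h
      subst h
      simp only [List.foldl_cons]
      exact ih _ _ (by rw [pvHead?_insertBy])

-- B-side: on the enumerated pairs the lexicographic running minimum IS the first-minimum scan
lemma pvFoldl_lex_enumerate (hD vD : Int) :
    ∀ (rest : List (Int × Int)) (s bw bi : Int), bi < s →
      ((PySem.List.enumerate rest s).map (fun ip => (pvW hD vD ip.2, ip.1))).foldl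
        (fun m x => if (decide (x.1 < m.1) || (!decide (m.1 < x.1) && decide (x.2 < m.2))) = true
                    then x else m) (bw, bi)
      = ((choosePieceLoop hD vD rest bi bw s).2, (choosePieceLoop hD vD rest bi bw s).1) := by
  intro rest
  induction rest with
  | nil => intro s bw bi _; simp [PySem.List.enumerate, choosePieceLoop]
  | cons q rest ih =>
    intro s bw bi hlt
    have henum : PySem.List.enumerate (q :: rest) s = (s, q) :: PySem.List.enumerate rest (s + 1) := rfl
    rw [henum]
    simp only [List.map_cons, List.foldl_cons]
    have hsnd : decide (s < bi) = false := by simp; omega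
    by_cases hw : pvW hD vD q < bw
    · have hcond : (decide (pvW hD vD q < bw) || (!decide (bw < pvW hD vD q) && decide (s < bi))) = true := by
        simp [hw]
      rw [if_pos hcond]
      have hloop : choosePieceLoop hD vD (q :: rest) bi bw s
          = choosePieceLoop hD vD rest s (pvW hD vD q) (s + 1) := by
        simp [choosePieceLoop, show calculateWaste q.2 q.1 vD + calculateWaste q.1 q.2 hD = pvW hD vD q from rfl, hw]
      rw [hloop]
      exact ih (s + 1) (pvW hD vD q) s (by omega)
    · have hcond : (decide (pvW hD vD q < bw) || (!decide (bw < pvW hD vD q) && decide (s < bi))) = false := by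
        simp only [hsnd, Bool.and_false, Bool.or_false]
        simpa using hw
      rw [hcond]
      simp only [Bool.false_eq_true, if_false]
      have hloop : choosePieceLoop hD vD (q :: rest) bi bw s
          = choosePieceLoop hD vD rest bi bw (s + 1) := by
        simp [choosePieceLoop, show calculateWaste q.2 q.1 vD + calculateWaste q.1 q.2 hD = pvW hD vD q from rfl, hw]
      rw [hloop]
      exact ih (s + 1) bw bi (by omega)

-- B reduces to the same first-minimum scan
lemma pvB_eq_loop (p : Int × Int) (rest : List (Int × Int)) (hD vD : Int) :
    choosePiece_alt (p :: rest) hD vD = choosePieceLoop hD vD rest 0 (pvW hD vD p) 1 := by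
  unfold choosePiece_alt
  have henum : PySem.List.enumerate (p :: rest) 0 = (0, p) :: PySem.List.enumerate rest 1 := rfl
  have hhead : (PySem.List.sorted2
      ((PySem.List.enumerate (p :: rest) 0).map
        (fun ip => (calculateWaste ip.2.2 ip.2.1 vD + calculateWaste ip.2.1 ip.2.2 hD, ip.1)))
      Prod.fst Prod.snd).head?
      = some ((choosePieceLoop hD vD rest 0 (pvW hD vD p) 1).2,
              (choosePieceLoop hD vD rest 0 (pvW hD vD p) 1).1) := by
    rw [henum]
    simp only [List.map_cons, PySem.List.sorted2, List.foldl_cons]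
    rw [pvHead?_foldl_insertBy _ _ _ _ (by rfl)]
    have hmapW : (PySem.List.enumerate rest 1).map
        (fun ip => (calculateWaste ip.2.2 ip.2.1 vD + calculateWaste ip.2.1 ip.2.2 hD, ip.1))
        = (PySem.List.enumerate rest 1).map (fun ip => (pvW hD vD ip.2, ip.1)) := rfl
    rw [hmapW]
    simp only [Bool.false_eq_true, if_false,
      show calculateWaste p.2 p.1 vD + calculateWaste p.1 p.2 hD = pvW hD vD p from rfl]
    rw [pvFoldl_lex_enumerate hD vD rest 1 (pvW hD vD p) 0 (by omega)]
  generalize hR : PySem.List.sorted2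
      ((PySem.List.enumerate (p :: rest) 0).map
        (fun ip => (calculateWaste ip.2.2 ip.2.1 vD + calculateWaste ip.2.1 ip.2.2 hD, ip.1)))
      Prod.fst Prod.snd = R at hhead ⊢
  cases R with
  | nil => simp at hhead
  | cons r rs =>
    simp only [List.head?_cons, Option.some.injEq] at hhead
    subst hhead
    rfl

-- ===== VERDICT (by name: the statement is the Claim_ definition above) =====
theorem choosePiece_spec : Claim_equal_choosePiece := by
  intro pieces hD vD _ hpre
  unfold Spec_choosePiece
  obtain ⟨hne, -⟩ := hpre
  cases pieces with
  | nil => exact absurd rfl hne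
  | cons p rest => rw [pvA_eq_loop, pvB_eq_loop]
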